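-- pv_equiv track=rewrite | github.com/RasmusAaen/AdventOfCode | 2015/day3.py | part2
-- ===== SOURCE A (Python) =====
-- def part2(values: str) -> int:
--     houses = {}
--     posX = posY = 0
--     posXr = posYr = 0
--
--     houses[(posX,posY)] = 1
--     houses[(posXr,posYr)] += 1
--     for i in range(len(values)):
--         santa = False
--         if i % 2 == 0:
--             santa = True
--         if values[i] == '>':
--             if santa:
--                 posX += 1
--             else:
--                 posXr += 1
--         elif values[i] == 'v':
--             if santa:
--                 posY -= 1
--             else:
--                 posYr -= 1
--         elif values[i] == '<':
--             if santa:
--                 posX -= 1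
--             else:
--                 posXr -= 1
--         elif values[i] == '^':
--             if santa:
--                 posY += 1
--             else:
--                 posYr += 1
--         if santa:
--             if (posX, posY) in houses:
--                 houses[(posX,posY)] += 1
--             else:
--                 houses[(posX,posY)] = 1
--         else:
--             if (posXr, posYr) in houses:
--                 houses[(posXr,posYr)] += 1
--             else:
--                 houses[(posXr,posYr)] = 1
--
--     return len(houses.values())
-- ===== SOURCE B (Python) =====
-- DIRS = {'>': (1, 0), 'v': (0, -1), '<': (-1, 0), '^': (0, 1)}
--
-- def _walk(moves):
--     # every coordinate visited, starting at the origin; unknown chars move nowhere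
--     x = y = 0
--     seen = [(0, 0)]
--     for c in moves:
--         dx, dy = DIRS.get(c, (0, 0))
--         x += dx
--         y += dy
--         seen.append((x, y))
--     return seen
--
-- def _split_alternating(values):
--     santa_moves = []
--     robo_moves = []
--     i = 0
--     while i + 1 < len(values):
--         santa_moves.append(values[i])
--         robo_moves.append(values[i + 1])
--         i += 2
--     if i < len(values):
--         santa_moves.append(values[i])
--     return santa_moves, robo_moves
--
-- def part2(values: str) -> int:
--     santa_moves, robo_moves = _split_alternating(values)
--     return len(set(_walk(santa_moves)) | set(_walk(robo_moves)))
-- ===== Notes on version B (the rewrite author's own statement) =====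
-- stated objective: alternative
-- what changed: A's single interleaved loop that flips a santa/robo flag and counts in a dict of visit counts is replaced by splitting the moves into the even- and odd-indexed subsequences, walking each independently from the origin via a direction table, and returning the size of the union of the two visited-coordinate sets.
import Mathlib
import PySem

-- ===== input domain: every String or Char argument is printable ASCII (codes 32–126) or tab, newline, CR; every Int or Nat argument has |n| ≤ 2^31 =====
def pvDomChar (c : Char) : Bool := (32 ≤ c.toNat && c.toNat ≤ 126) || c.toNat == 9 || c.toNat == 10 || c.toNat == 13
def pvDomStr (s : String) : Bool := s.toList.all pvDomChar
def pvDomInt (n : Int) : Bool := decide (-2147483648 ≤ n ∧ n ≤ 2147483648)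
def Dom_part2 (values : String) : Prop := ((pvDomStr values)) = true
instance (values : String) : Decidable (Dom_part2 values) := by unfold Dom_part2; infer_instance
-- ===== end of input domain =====

-- B replaces A's interleaved flag-driven dict loop by two independent walks over the
-- even- and odd-indexed moves whose visited coordinates are unioned as a set (objective: alternative).

-- ===== PORT A =====
-- the for-loop over range(len(values)); state: index i, santa position, robo position, the houses dict
def part2Loop : List Char → Nat → Int → Int → Int → Int →
    PySem.Dict (Int × Int) Int → PySem.Dict (Int × Int) Int
  | [], _, _, _, _, _, houses => houses
  | c :: rest, i, posX, posY, posXr, posYr, houses =>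
    let santa : Bool := i % 2 == 0
    -- A's if/elif chain over values[i], p = the four positions after this step
    let p : Int × Int × Int × Int :=
      if c == '>' then (if santa then (posX + 1, posY, posXr, posYr) else (posX, posY, posXr + 1, posYr))
      else if c == 'v' then (if santa then (posX, posY - 1, posXr, posYr) else (posX, posY, posXr, posYr - 1))
      else if c == '<' then (if santa then (posX - 1, posY, posXr, posYr) else (posX, posY, posXr - 1, posYr))
      else if c == '^' then (if santa then (posX, posY + 1, posXr, posYr) else (posX, posY, posXr, posYr + 1))
      else (posX, posY, posXr, posYr)
    let houses :=
      if santa then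
        if houses.contains (p.1, p.2.1) then houses.insert (p.1, p.2.1) (houses.getD (p.1, p.2.1) 0 + 1)
        else houses.insert (p.1, p.2.1) 1
      else
        if houses.contains (p.2.2.1, p.2.2.2) then houses.insert (p.2.2.1, p.2.2.2) (houses.getD (p.2.2.1, p.2.2.2) 0 + 1)
        else houses.insert (p.2.2.1, p.2.2.2) 1
    part2Loop rest (i + 1) p.1 p.2.1 p.2.2.1 p.2.2.2 houses

def part2 (values : String) : Int :=
  let houses : PySem.Dict (Int × Int) Int := PySem.Dict.empty.insert (0, 0) 1
  -- houses[(posXr,posYr)] += 1 : the key (0,0) is present, so d[k] += 1 is insert k (d[k] + 1)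
  let houses := houses.insert (0, 0) (houses.getD (0, 0) 0 + 1)
  (part2Loop values.toList 0 0 0 0 0 houses).values.length

-- ===== PORT B =====
def pvDirs : PySem.Dict Char (Int × Int) :=
  PySem.Dict.ofList [('>', (1, 0)), ('v', (0, -1)), ('<', (-1, 0)), ('^', (0, 1))]

-- _walk's loop: the coordinates visited after each move (the caller prepends the origin)
def pvWalk : List Char → Int → Int → List (Int × Int)
  | [], _, _ => []
  | c :: rest, x, y =>
    let d := pvDirs.getD c (0, 0)
    let x := x + d.1
    let y := y + d.2
    (x, y) :: pvWalk rest x y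

-- _split_alternating's while loop: two chars per iteration, plus the leftover one
def pvSplit : List Char → List Char × List Char
  | [] => ([], [])
  | [c] => ([c], [])
  | c :: d :: rest =>
    let (s, r) := pvSplit rest
    (c :: s, d :: r)

def part2_alt (values : String) : Int :=
  let (santaMoves, roboMoves) := pvSplit values.toList
  let seenS : List (Int × Int) := (0, 0) :: pvWalk santaMoves 0 0
  let seenR : List (Int × Int) := (0, 0) :: pvWalk roboMoves 0 0
  PySem.Set.len (PySem.Set.union (PySem.Set.ofList seenS) (PySem.Set.ofList seenR))

-- ===== PRECONDITION & SPEC =====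
def Spec_part2 (values : String) (out : Int) : Prop := out = part2_alt values
instance (values : String) (out : Int) : Decidable (Spec_part2 values out) := by unfold Spec_part2; infer_instance

-- ===== CLAIM (what is proved, stated in full; the proofs are below) =====
def Claim_equal_part2 : Prop := ∀ (values : String), Dom_part2 values → Spec_part2 values (part2 values)

-- ===== LEMMAS AND PROOFS =====

theorem pvSplit_cons (cs : List Char) : ∀ c : Char,
    pvSplit (c :: cs) = (c :: (pvSplit cs).2, (pvSplit cs).1) := by
  induction cs with
  | nil => intro c; rfl
  | cons d rest ih =>
    intro c
    have hd := ih d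
    simp only [pvSplit]
    rw [hd]

theorem pvDirs_gt : pvDirs.getD '>' ((0 : Int), (0 : Int)) = (1, 0) := by decide
theorem pvDirs_dn : pvDirs.getD 'v' ((0 : Int), (0 : Int)) = (0, -1) := by decide
theorem pvDirs_lt : pvDirs.getD '<' ((0 : Int), (0 : Int)) = (-1, 0) := by decide
theorem pvDirs_up : pvDirs.getD '^' ((0 : Int), (0 : Int)) = (0, 1) := by decide

theorem pvDirs_other (c : Char) (h1 : c ≠ '>') (h2 : c ≠ 'v') (h3 : c ≠ '<') (h4 : c ≠ '^') :
    pvDirs.getD c ((0 : Int), (0 : Int)) = (0, 0) := by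
  have h : pvDirs = PySem.Dict.mk [('>', (1, 0)), ('v', (0, -1)), ('<', (-1, 0)), ('^', (0, 1))] := rfl
  rw [h]
  simp [PySem.Dict.getD_eq_get?_getD, Ne.symm h1, Ne.symm h2,
    Ne.symm h3, Ne.symm h4, PySem.Dict.get?]

theorem step_keys (d : PySem.Dict (Int × Int) Int) (p k : Int × Int) :
    (k ∈ (if d.contains p then d.insert p (d.getD p 0 + 1) else d.insert p 1).keys) ↔
      k = p ∨ k ∈ d.keys := by
  split_ifs <;> simp [PySem.Dict.mem_keys_insert]

theorem mem_keys_part2Loop (cs : List Char) : ∀ (i : Nat) (x y xr yr : Int)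
    (d : PySem.Dict (Int × Int) Int) (k : Int × Int),
    (k ∈ (part2Loop cs i x y xr yr d).keys) ↔
      k ∈ d.keys ∨
        (if i % 2 = 0
         then k ∈ pvWalk (pvSplit cs).1 x y ∨ k ∈ pvWalk (pvSplit cs).2 xr yr
         else k ∈ pvWalk (pvSplit cs).2 x y ∨ k ∈ pvWalk (pvSplit cs).1 xr yr) := by
  induction cs with
  | nil => intro i x y xr yr d k; simp [part2Loop, pvSplit, pvWalk]
  | cons c rest ih =>
    intro i x y xr yr d k
    rw [pvSplit_cons]
    by_cases h0 : i % 2 = 0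
    · have hs : (i % 2 == 0) = true := by simp [h0]
      have h1 : (i + 1) % 2 ≠ 0 := by omega
      by_cases hc1 : c = '>'
      · subst hc1
        simp only [part2Loop, hs, if_true]
        rw [ih]
        simp [h0, h1, step_keys, pvWalk, pvDirs_gt]
        tauto
      · by_cases hc2 : c = 'v'
        · subst hc2
          simp only [part2Loop, hs, if_true]
          rw [ih]
          simp [h0, h1, step_keys, pvWalk, pvDirs_dn]
          tauto
        · by_cases hc3 : c = '<'
          · subst hc3
            simp only [part2Loop, hs, if_true]
            rw [ih]
            simp [h0, h1, step_keys, pvWalk, pvDirs_lt]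
            tauto
          · by_cases hc4 : c = '^'
            · subst hc4
              simp only [part2Loop, hs, if_true]
              rw [ih]
              simp [h0, h1, step_keys, pvWalk, pvDirs_up]
              tauto
            · simp only [part2Loop, hs, if_true]
              rw [ih]
              simp [h0, h1, hc1, hc2, hc3, hc4, step_keys, pvWalk,
                pvDirs_other c hc1 hc2 hc3 hc4]
              tauto
    · have hs : (i % 2 == 0) = false := by simp [h0]
      have h1 : (i + 1) % 2 = 0 := by omega
      by_cases hc1 : c = '>'
      · subst hc1
        simp only [part2Loop, hs]
        rw [ih]
        simp [h0, h1, step_keys, pvWalk, pvDirs_gt]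
        tauto
      · by_cases hc2 : c = 'v'
        · subst hc2
          simp only [part2Loop, hs]
          rw [ih]
          simp [h0, h1, step_keys, pvWalk, pvDirs_dn]
          tauto
        · by_cases hc3 : c = '<'
          · subst hc3
            simp only [part2Loop, hs]
            rw [ih]
            simp [h0, h1, step_keys, pvWalk, pvDirs_lt]
            tauto
          · by_cases hc4 : c = '^'
            · subst hc4
              simp only [part2Loop, hs]
              rw [ih]
              simp [h0, h1, step_keys, pvWalk, pvDirs_up]
              tauto
            · simp only [part2Loop, hs]
              rw [ih]
              simp [h0, h1, hc1, hc2, hc3, hc4, step_keys, pvWalk,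
                pvDirs_other c hc1 hc2 hc3 hc4]
              tauto

theorem nodup_keys_part2Loop (cs : List Char) : ∀ (i : Nat) (x y xr yr : Int)
    (d : PySem.Dict (Int × Int) Int), d.keys.Nodup →
    (part2Loop cs i x y xr yr d).keys.Nodup := by
  induction cs with
  | nil => intro i x y xr yr d h; simpa [part2Loop] using h
  | cons c rest ih =>
    intro i x y xr yr d h
    simp only [part2Loop]
    apply ih
    split_ifs <;> exact PySem.Dict.nodup_keys_insert _ _ _ h

theorem values_length_eq_keys_length (d : PySem.Dict (Int × Int) Int) :
    d.values.length = d.keys.length := by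
  simp [PySem.Dict.values, PySem.Dict.keys]

-- ===== VERDICT (by name: the statement is the Claim_ definition above) =====
theorem part2_spec : Claim_equal_part2 := by
  intro values _
  unfold Spec_part2
  show part2 values = part2_alt values
  have main : ∀ d0 : PySem.Dict (Int × Int) Int,
      (∀ k : Int × Int, k ∈ d0.keys ↔ k = (0, 0)) → d0.keys.Nodup →
      ((part2Loop values.toList 0 0 0 0 0 d0).values.length : Int) =
        PySem.Set.len (PySem.Set.union
          (PySem.Set.ofList (((0, 0) : Int × Int) :: pvWalk (pvSplit values.toList).1 0 0))
          (PySem.Set.ofList (((0, 0) : Int × Int) :: pvWalk (pvSplit values.toList).2 0 0))) := by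
    intro d0 hkeys hnd
    have hmem : ∀ k : Int × Int,
        k ∈ (part2Loop values.toList 0 0 0 0 0 d0).keys ↔
        k ∈ PySem.Set.union
          (PySem.Set.ofList (((0, 0) : Int × Int) :: pvWalk (pvSplit values.toList).1 0 0))
          (PySem.Set.ofList (((0, 0) : Int × Int) :: pvWalk (pvSplit values.toList).2 0 0)) := by
      intro k
      rw [mem_keys_part2Loop]
      simp [hkeys, PySem.Set.mem_union, PySem.Set.mem_ofList]
      tauto
    have hnd1 := nodup_keys_part2Loop values.toList 0 0 0 0 0 d0 hnd
    have hnd2 :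
        (PySem.Set.union
          (PySem.Set.ofList (((0, 0) : Int × Int) :: pvWalk (pvSplit values.toList).1 0 0))
          (PySem.Set.ofList (((0, 0) : Int × Int) :: pvWalk (pvSplit values.toList).2 0 0))).Nodup :=
      PySem.Set.nodup_union _ _ (PySem.Set.nodup_ofList _)
    have hlen := ((List.perm_ext_iff_of_nodup hnd1 hnd2).2 hmem).length_eq
    have hv := values_length_eq_keys_length (part2Loop values.toList 0 0 0 0 0 d0)
    simp only [PySem.Set.len]
    exact_mod_cast hv.trans hlen
  exact main _
    (by intro k; simp [PySem.Dict.mem_keys_insert, PySem.Dict.keys_empty])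
    (by decide)
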